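-- pv_equiv track=rewrite | github.com/bbjoverbeek/Error_Group_name_not_found | script_to_json.py | group_scene_description
-- ===== SOURCE A (Python) =====
-- def group_scene_description(scene_description, script, line_no, i):
--
--     if not script[line_no + i].startswith('N|') and i != 0:
--         return scene_description, (line_no + i - 1)
--     else:
--         if i == 0:
--             scene_description['scene description'] = \
--                 script[line_no + i][2:-1].lstrip()
--         else:
--             scene_description['scene description'] += \
--                script[line_no + i][2:-1].lstrip()
--
--     return group_scene_description(scene_description, script, line_no, i+1)
-- ===== SOURCE B (Python) =====
-- def group_scene_description(scene_description, script, line_no, i):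
--     # Collect all consecutive description chunks in one scan, then do a single
--     # join and a single dict update instead of one update per line.
--     parts = []
--     j = i
--     while j == 0 or script[line_no + j].startswith('N|'):
--         parts.append(script[line_no + j][2:-1].lstrip())
--         j += 1
--     if parts:
--         text = ''.join(parts)
--         if i == 0:
--             scene_description['scene description'] = text
--         else:
--             scene_description['scene description'] += text
--     return scene_description, line_no + j - 1
-- ===== Notes on version B (the rewrite author's own statement) =====
-- stated objective: alternative
-- what changed: A's tail recursion with one dict read-modify-write per consumed line is replaced by a single while-loop scan that collects the chunks in a list, one ''.join, and one dict update; Pre_ restricts to the natural domain i >= 0 (i is the recursion depth of the grouping scan, always non-negative in use) besides excluding A's IndexError/KeyError inputs.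
import Mathlib
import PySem

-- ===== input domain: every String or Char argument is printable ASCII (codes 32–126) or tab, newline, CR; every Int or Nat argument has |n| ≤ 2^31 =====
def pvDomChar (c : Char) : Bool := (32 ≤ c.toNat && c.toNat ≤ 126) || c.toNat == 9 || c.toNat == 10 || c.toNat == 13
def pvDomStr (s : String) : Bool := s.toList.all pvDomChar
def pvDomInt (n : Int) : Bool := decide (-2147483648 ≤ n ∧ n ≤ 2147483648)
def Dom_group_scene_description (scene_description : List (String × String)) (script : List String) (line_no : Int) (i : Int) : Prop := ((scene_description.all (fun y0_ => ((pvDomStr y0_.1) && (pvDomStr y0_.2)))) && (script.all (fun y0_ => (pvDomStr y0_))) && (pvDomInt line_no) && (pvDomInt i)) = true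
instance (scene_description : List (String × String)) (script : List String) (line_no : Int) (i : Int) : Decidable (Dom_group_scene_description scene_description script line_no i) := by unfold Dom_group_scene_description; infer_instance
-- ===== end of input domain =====

-- B replaces A's tail recursion (one dict update per consumed line) by one while-loop scan that
-- collects the chunks, one join and one dict update (alternative decomposition).


-- ===== PORT A =====
-- literal port of A's tail recursion; `none` from pyGet? is Python's IndexError and a missing
-- key on `+=` is Python's KeyError — both excluded by Pre_ below (there the port's value is junk)
def group_scene_description (scene_description : List (String × String)) (script : List String) (line_no : Int) (i : Int) : (List (String × String)) × Int :=
  match h : PySem.List.pyGet? script (line_no + i) with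
  | none => (scene_description, line_no + i - 1)   -- Python raises IndexError here (outside Pre_)
  | some line =>
    if PySem.Str.startswith line "N|" = false ∧ i ≠ 0 then
      (scene_description, line_no + i - 1)
    else
      let chunk := PySem.Str.lstrip (PySem.Str.slice line (some 2) (some (-1)))
      let d := PySem.Dict.mk scene_description
      let sd' :=
        if i = 0 then (d.insert "scene description" chunk).items
        else (d.insert "scene description" (d.getD "scene description" "" ++ chunk)).items
          -- Python raises KeyError when the key is missing here (outside Pre_)
      group_scene_description sd' script line_no (i + 1)
termination_by ((script.length : Int) - (line_no + i)).toNat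
decreasing_by
  have hin : PySem.Raise.InRange script.length (line_no + i) := by
    by_contra hc
    rw [← PySem.List.pyGet?_eq_none_iff] at hc
    simp [hc] at h
  simp only [PySem.Raise.InRange] at hin
  omega

-- ===== PORT B =====
-- Source B's while loop: find the first stopping index j (same reads, same IndexError point)
def gsdStop (script : List String) (line_no : Int) (j : Int) : Int :=
  match h : PySem.List.pyGet? script (line_no + j) with
  | none => j   -- Python raises IndexError here (outside Pre_)
  | some line =>
    if j = 0 ∨ PySem.Str.startswith line "N|" = true then gsdStop script line_no (j + 1)
    else j
termination_by ((script.length : Int) - (line_no + j)).toNat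
decreasing_by
  have hin : PySem.Raise.InRange script.length (line_no + j) := by
    by_contra hc
    rw [← PySem.List.pyGet?_eq_none_iff] at hc
    simp [hc] at h
  simp only [PySem.Raise.InRange] at hin
  omega

def group_scene_description_alt (scene_description : List (String × String)) (script : List String) (line_no : Int) (i : Int) : (List (String × String)) × Int :=
  let j := gsdStop script line_no i
  let parts := (PySem.List.pyRange i j 1).map (fun k =>
    PySem.Str.lstrip (PySem.Str.slice (PySem.List.pyGetD script (line_no + k) "") (some 2) (some (-1))))
  if parts = [] then (scene_description, line_no + j - 1)
  else
    let text := PySem.Str.join "" parts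
    let d := PySem.Dict.mk scene_description
    let sd' :=
      if i = 0 then (d.insert "scene description" text).items
      else (d.insert "scene description" (d.getD "scene description" "" ++ text)).items
        -- Python raises KeyError when the key is missing here (outside Pre_)
    (sd', line_no + j - 1)

-- ===== PRECONDITION & SPEC =====
-- Pre_ restricts to the natural domain 0 ≤ i (i is the recursion depth of the grouping scan,
-- always non-negative in use) and otherwise holds exactly where the Python A returns: some
-- later in-range line stops the recursion (else IndexError past the end), and when the first
-- step is a `+=` the key is present (else KeyError).
def Pre_group_scene_description (scene_description : List (String × String)) (script : List String) (line_no : Int) (i : Int) : Prop :=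
  0 ≤ i ∧ -(script.length : Int) ≤ line_no + i ∧
  (∃ j, j ∈ PySem.List.pyRange i ((script.length : Int) - line_no) 1 ∧ j ≠ 0 ∧
     PySem.Str.startswith (PySem.List.pyGetD script (line_no + j) "") "N|" = false) ∧
  ((i ≠ 0 ∧ PySem.Str.startswith (PySem.List.pyGetD script (line_no + i) "") "N|" = true) →
     "scene description" ∈ scene_description.map Prod.fst)
instance (scene_description : List (String × String)) (script : List String) (line_no : Int) (i : Int) : Decidable (Pre_group_scene_description scene_description script line_no i) := by unfold Pre_group_scene_description; infer_instance

def pvWitness_group_scene_description : (List (String × String)) × List String × Int × Int :=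
  ([], ["N|ab.", "X"], 0, 0)

def Spec_group_scene_description (scene_description : List (String × String)) (script : List String) (line_no : Int) (i : Int) (out : (List (String × String)) × Int) : Prop := out = group_scene_description_alt scene_description script line_no i
instance (scene_description : List (String × String)) (script : List String) (line_no : Int) (i : Int) (out : (List (String × String)) × Int) : Decidable (Spec_group_scene_description scene_description script line_no i out) := by unfold Spec_group_scene_description; infer_instance

-- ===== CLAIM (what is proved, stated in full; the proofs are below) =====
def Claim_equal_group_scene_description : Prop := ∀ (scene_description : List (String × String)) (script : List String) (line_no : Int) (i : Int), Dom_group_scene_description scene_description script line_no i → Pre_group_scene_description scene_description script line_no i → Spec_group_scene_description scene_description script line_no i (group_scene_description scene_description script line_no i)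

-- ===== LEMMAS AND PROOFS =====

theorem strJoin_cons (x : String) (xs : List String) :
    PySem.Str.join "" (x :: xs) = x ++ PySem.Str.join "" xs := by
  simp only [PySem.Str.join, List.map_cons]
  induction xs with
  | nil => simp [PySem.Chars.join, List.intercalate]
  | cons y ys ih => simp [PySem.Chars.join, List.intercalate] at *

theorem strJoin_nil : PySem.Str.join "" ([] : List String) = "" := by
  simp [PySem.Chars.join, List.intercalate, PySem.Str.join]

theorem gsdStop_stop {script : List String} {line_no j : Int} {line : String}
    (h : PySem.List.pyGet? script (line_no + j) = some line)
    (hc : ¬ (j = 0 ∨ PySem.Str.startswith line "N|" = true)) :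
    gsdStop script line_no j = j := by
  unfold gsdStop
  split
  · rfl
  · rename_i line' heq
    rw [h] at heq; cases heq
    rw [if_neg hc]

theorem gsdStop_next {script : List String} {line_no j : Int} {line : String}
    (h : PySem.List.pyGet? script (line_no + j) = some line)
    (hc : j = 0 ∨ PySem.Str.startswith line "N|" = true) :
    gsdStop script line_no j = gsdStop script line_no (j + 1) := by
  unfold gsdStop
  split
  · rename_i heq; rw [h] at heq; cases heq
  · rename_i line' heq
    rw [h] at heq; cases heq
    rw [if_pos hc]
    rw [← gsdStop]

theorem gsdStop_ge (script : List String) (line_no : Int) : ∀ j, j ≤ gsdStop script line_no j := by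
  intro j
  fun_induction gsdStop script line_no j with
  | case1 => omega
  | case2 j line h hc ih => omega
  | case3 => omega

theorem pyGetD_eq_line {script : List String} {idx : Int} {line : String}
    (h : PySem.List.pyGet? script idx = some line) :
    PySem.List.pyGetD script idx "" = line := by
  show (PySem.List.pyGet? script idx).getD "" = line
  rw [h]; rfl

-- the one-step equation B's scan-and-join form satisfies on a consumed line (i ≥ 0)
theorem alt_step (script : List String) (ln : Int) (sd : List (String × String)) (i : Int)
    (line : String) (hi : 0 ≤ i)
    (h : PySem.List.pyGet? script (ln + i) = some line)
    (hc : i = 0 ∨ PySem.Str.startswith line "N|" = true) :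
    group_scene_description_alt sd script ln i =
      group_scene_description_alt
        (if i = 0 then
          ((PySem.Dict.mk sd).insert "scene description"
            (PySem.Str.lstrip (PySem.Str.slice line (some 2) (some (-1))))).items
         else
          ((PySem.Dict.mk sd).insert "scene description"
            ((PySem.Dict.mk sd).getD "scene description" "" ++
              PySem.Str.lstrip (PySem.Str.slice line (some 2) (some (-1))))).items)
        script ln (i + 1) := by
  have hnext := gsdStop_next h hc
  have hge : i + 1 ≤ gsdStop script ln (i + 1) := gsdStop_ge script ln (i + 1)
  simp only [group_scene_description_alt, hnext]
  generalize hJ : gsdStop script ln (i + 1) = j at hge ⊢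
  rw [PySem.List.pyRange_one_cons (by omega : i < j)]
  simp only [List.map_cons, pyGetD_eq_line h]
  set chunk := PySem.Str.lstrip (PySem.Str.slice line (some 2) (some (-1))) with hchunk
  set parts' := (PySem.List.pyRange (i + 1) j 1).map (fun k =>
    PySem.Str.lstrip (PySem.Str.slice (PySem.List.pyGetD script (ln + k) "") (some 2) (some (-1)))) with hparts
  set d := PySem.Dict.mk sd with hd
  rw [if_neg (by simp : ¬ (chunk :: parts' = []))]
  have hmk : ∀ v : String, PySem.Dict.mk ((d.insert "scene description" v).items)
      = d.insert "scene description" v := fun _ => rfl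
  by_cases hji : j = i + 1
  · -- the scan stops right after this line
    have hnil : parts' = [] := by
      rw [hparts, PySem.List.pyRange_one_eq_nil (by omega : j ≤ i + 1)]; rfl
    rw [hnil]
    by_cases hi0 : i = 0
    · simp only [if_pos hi0]
      rw [strJoin_cons, strJoin_nil, String.append_empty]
      simp
    · simp only [if_neg hi0]
      rw [strJoin_cons, strJoin_nil, String.append_empty]
      simp
  · have hne : parts' ≠ [] := by
      rw [hparts, PySem.List.pyRange_one_cons (by omega : i + 1 < j)]; simp
    rw [if_neg hne]
    by_cases hi0 : i = 0
    · simp only [if_pos hi0, if_neg (by omega : ¬ (i:Int) + 1 = 0)]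
      rw [hmk, PySem.Dict.getD_insert_self, PySem.Dict.insert_insert_self]
      rw [strJoin_cons]
    · simp only [if_neg hi0, if_neg (by omega : ¬ (i:Int) + 1 = 0)]
      rw [hmk, PySem.Dict.getD_insert_self, PySem.Dict.insert_insert_self]
      rw [strJoin_cons, String.append_assoc]

-- Pre_ carries over to the recursive call after a consumed line
theorem pre_step (script : List String) (ln : Int) (sd : List (String × String)) (i : Int)
    (line : String) (hi : 0 ≤ i)
    (h : PySem.List.pyGet? script (ln + i) = some line)
    (hc : i = 0 ∨ PySem.Str.startswith line "N|" = true)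
    (hpre : Pre_group_scene_description sd script ln i) (v : String) :
    Pre_group_scene_description
      (((PySem.Dict.mk sd).insert "scene description" v).items) script ln (i + 1) := by
  obtain ⟨-, hlo, ⟨j, hjmem, hj0, hjstop⟩, -⟩ := hpre
  rw [PySem.List.mem_pyRange_one] at hjmem
  have hij : i < j := by
    rcases lt_or_eq_of_le hjmem.1 with h' | h'
    · exact h'
    · exfalso
      subst h'
      rw [pyGetD_eq_line h] at hjstop
      rcases hc with hc | hc
      · exact hj0 hc
      · rw [hc] at hjstop; cases hjstop
  refine ⟨by omega, by omega, ⟨j, ?_, hj0, hjstop⟩, fun _ => ?_⟩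
  · rw [PySem.List.mem_pyRange_one]; exact ⟨by omega, hjmem.2⟩
  · -- the key is present after any insert of it
    have : "scene description" ∈ ((PySem.Dict.mk sd).insert "scene description" v).keys := by
      rw [PySem.Dict.mem_keys_insert]; exact Or.inl rfl
    simpa [PySem.Dict.keys] using this

theorem group_scene_description_spec_aux :
    ∀ (scene_description : List (String × String)) (script : List String) (line_no : Int) (i : Int),
    Pre_group_scene_description scene_description script line_no i →
    group_scene_description scene_description script line_no i =
      group_scene_description_alt scene_description script line_no i := by
  intro sd script ln i
  fun_induction group_scene_description sd script ln i with
  | case1 sd i h =>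
    -- A would raise IndexError; Pre_ rules this out
    intro hpre
    obtain ⟨hi, hlo, ⟨j, hjmem, -, -⟩, -⟩ := hpre
    rw [PySem.List.mem_pyRange_one] at hjmem
    have hnr := (PySem.List.pyGet?_eq_none_iff script (ln + i)).mp h
    simp only [PySem.Raise.InRange] at hnr
    omega
  | case2 sd i line h hc =>
    intro hpre
    have hstop : gsdStop script ln i = i := by
      refine gsdStop_stop h ?_
      rintro (hz | hs)
      · exact hc.2 hz
      · rw [hc.1] at hs; cases hs
    have hnil : (PySem.List.pyRange i i 1).map (fun k =>
        PySem.Str.lstrip (PySem.Str.slice (PySem.List.pyGetD script (ln + k) "") (some 2) (some (-1)))) = [] := by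
      rw [PySem.List.pyRange_one_eq_nil (le_refl i)]; rfl
    simp [group_scene_description_alt, hstop]
  | case3 sd i line h hc chunk d sd' ih =>
    intro hpre
    have hi : 0 ≤ i := hpre.1
    have hc' : i = 0 ∨ PySem.Str.startswith line "N|" = true := by
      by_cases hs : PySem.Str.startswith line "N|" = true
      · exact Or.inr hs
      · left
        by_contra hi0
        exact hc ⟨by simpa using hs, hi0⟩
    have hstep := alt_step script ln sd i line hi h hc'
    have hsd' : sd' = (if i = 0 then
        ((PySem.Dict.mk sd).insert "scene description"
          (PySem.Str.lstrip (PySem.Str.slice line (some 2) (some (-1))))).items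
      else
        ((PySem.Dict.mk sd).insert "scene description"
          ((PySem.Dict.mk sd).getD "scene description" "" ++
            PySem.Str.lstrip (PySem.Str.slice line (some 2) (some (-1))))).items) := by
      simp only [sd']
      by_cases hi0 : i = 0
      · rw [dif_pos hi0, if_pos hi0]
      · rw [dif_neg hi0, if_neg hi0]
    have hpre' : Pre_group_scene_description sd' script ln (i + 1) := by
      rw [hsd']
      by_cases hi0 : i = 0
      · rw [if_pos hi0]; exact pre_step script ln sd i line hi h hc' hpre _
      · rw [if_neg hi0]; exact pre_step script ln sd i line hi h hc' hpre _
    rw [ih hpre', hstep, ← hsd']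

-- ===== VERDICT (by name: the statement is the Claim_ definition above) =====
theorem group_scene_description_spec : Claim_equal_group_scene_description := by
  intro sd script ln i _ hpre
  exact group_scene_description_spec_aux sd script ln i hpre
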